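-- pv_equiv track=rewrite | github.com/m3hu1/LeetCode-Problems | 2354-number-of-excellent-pairs/2354-number-of-excellent-pairs.py | countExcellentPairs
-- ===== SOURCE A (Python) =====
-- from typing import List
--
-- def countExcellentPairs(nums: List[int], k: int) -> int:
--     SET = set(nums)
--     temp = sorted([bin(i).count('1') for i in SET])
--     l, r, ans = 0, len(SET) - 1, 0
--
--     while l < r:
--         if temp[l] + temp[r] < k:
--             l += 1
--         else:
--             ans += 1 + 2 * (r - l)
--             r -= 1
--
--     if 2 * temp[l] >= k:
--         ans += 1
--
--     return ans
-- ===== SOURCE B (Python) =====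
-- from collections import Counter
--
-- def countExcellentPairs(nums, k):
--     cnt = Counter(bin(x).count('1') for x in set(nums))
--     return sum(c1 * c2
--                for b1, c1 in cnt.items()
--                for b2, c2 in cnt.items()
--                if b1 + b2 >= k)
-- ===== Notes on version B (the rewrite author's own statement) =====
-- stated objective: alternative
-- what changed: Replaces A's sort of the distinct popcounts plus two-pointer sweep by a Counter of popcount buckets and a double sum over bucket pairs (count products), removing the sort and the sweep; both runs are dominated by the O(n) popcount pass, so the measured cost is similar.
import Mathlib
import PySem

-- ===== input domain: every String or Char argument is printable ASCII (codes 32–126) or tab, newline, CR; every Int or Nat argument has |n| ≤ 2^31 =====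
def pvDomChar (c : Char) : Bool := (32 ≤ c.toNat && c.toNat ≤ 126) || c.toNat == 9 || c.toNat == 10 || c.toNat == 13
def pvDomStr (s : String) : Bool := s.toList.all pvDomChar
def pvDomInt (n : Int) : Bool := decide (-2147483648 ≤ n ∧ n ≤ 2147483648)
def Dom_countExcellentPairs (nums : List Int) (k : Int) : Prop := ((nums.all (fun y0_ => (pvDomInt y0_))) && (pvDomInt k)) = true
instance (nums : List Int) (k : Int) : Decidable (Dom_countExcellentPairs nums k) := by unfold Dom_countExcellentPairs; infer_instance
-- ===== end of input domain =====

-- B replaces A's sort + two-pointer sweep by a popcount frequency table (Counter) and a sum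
-- over count products of bucket pairs (objective: alternative — no sort, no sweep).

-- bin(i).count('1') — Python counts the binary ones of |i| (both programs use this expression)
def pcInt (i : Int) : Int := (PySem.Int.bitCount i : Int)

-- ===== PORT A =====
-- the while-loop of A; l, r are Nat (Python keeps 0 ≤ l ≤ r while the loop runs; nums = [],
-- where Python raises IndexError on temp[l], is outside Pre_); t.getD _ 0 is exact in-range indexing
def loopA (t : List Int) (k : Int) (l r : Nat) (ans : Int) : Nat × Int :=
  if _h : l < r then
    if t.getD l 0 + t.getD r 0 < k then
      loopA t k (l + 1) r ans
    else
      loopA t k l (r - 1) (ans + 1 + 2 * ((r : Int) - (l : Int)))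
  else (l, ans)
termination_by r - l
decreasing_by all_goals omega

def countExcellentPairs (nums : List Int) (k : Int) : Int :=
  let SET := PySem.Set.ofList nums
  let temp := PySem.List.sorted (SET.map pcInt) (fun x => x) false
  let p := loopA temp k 0 (SET.length - 1) 0
  if 2 * temp.getD p.1 0 ≥ k then p.2 + 1 else p.2

-- ===== PORT B =====
def countExcellentPairs_alt (nums : List Int) (k : Int) : Int :=
  let cnt := PySem.Dict.counter ((PySem.Set.ofList nums).map pcInt)
  cnt.items.foldl (fun acc p =>
    cnt.items.foldl (fun acc2 q =>
      if p.1 + q.1 ≥ k then acc2 + p.2 * q.2 else acc2) acc) 0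

-- ===== PRECONDITION & SPEC =====
-- A indexes temp[l] unconditionally, so it raises IndexError exactly on nums = []
def Pre_countExcellentPairs (nums : List Int) (k : Int) : Prop := nums ≠ []
instance (nums : List Int) (k : Int) : Decidable (Pre_countExcellentPairs nums k) := by
  unfold Pre_countExcellentPairs; infer_instance

def pvWitness_countExcellentPairs : List Int × Int := ([1, 2, 3], 2)

def Spec_countExcellentPairs (nums : List Int) (k : Int) (out : Int) : Prop := out = countExcellentPairs_alt nums k
instance (nums : List Int) (k : Int) (out : Int) : Decidable (Spec_countExcellentPairs nums k out) := by unfold Spec_countExcellentPairs; infer_instance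

-- ===== CLAIM (what is proved, stated in full; the proofs are below) =====
def Claim_equal_countExcellentPairs : Prop := ∀ (nums : List Int) (k : Int), Dom_countExcellentPairs nums k → Pre_countExcellentPairs nums k → Spec_countExcellentPairs nums k (countExcellentPairs nums k)

-- ===== LEMMAS AND PROOFS =====

-- the number of ordered pairs (a, b) of positions of s with a + b ≥ k
def Tsum (k : Int) (s : List Int) : Int :=
  (s.map (fun a => ((s.filter (fun b => k ≤ a + b)).length : Int))).sum

lemma Tsum_perm (k : Int) {s s' : List Int} (h : s.Perm s') : Tsum k s = Tsum k s' := by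
  unfold Tsum
  have hlen : ∀ a : Int, (s.filter (fun b => k ≤ a + b)).length = (s'.filter (fun b => k ≤ a + b)).length :=
    fun a => (h.filter _).length_eq
  rw [← (h.map (fun a => ((s'.filter (fun b => k ≤ a + b)).length : Int))).sum_eq]
  congr 1
  exact List.map_congr_left (fun a _ => by rw [hlen a])

lemma Tsum_cons_drop (k x : Int) (s : List Int)
    (hx : ∀ b ∈ x :: s, x + b < k) : Tsum k (x :: s) = Tsum k s := by
  unfold Tsum
  have hxx : ∀ b ∈ x :: s, ¬ (k ≤ x + b) := fun b hb => not_le.mpr (hx b hb)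
  have hfilx : (x :: s).filter (fun b => k ≤ x + b) = [] := by
    rw [List.filter_eq_nil_iff]; intro b hb; simpa using hxx b hb
  have hfa : ∀ a ∈ s, (x :: s).filter (fun b => k ≤ a + b) = s.filter (fun b => k ≤ a + b) := by
    intro a ha
    rw [List.filter_cons]
    have : ¬ (k ≤ a + x) := by rw [add_comm]; exact hxx a (List.mem_cons_of_mem x ha)
    simp [this]
  rw [List.map_cons, List.sum_cons, hfilx]
  simp only [List.length_nil, Nat.cast_zero, zero_add]
  congr 1
  exact List.map_congr_left (fun a ha => by rw [hfa a ha])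

lemma Tsum_append_take (k y : Int) (s : List Int)
    (hy : ∀ a ∈ s ++ [y], k ≤ a + y) :
    Tsum k (s ++ [y]) = Tsum k s + 2 * (s.length : Int) + 1 := by
  unfold Tsum
  have hcomm : ∀ a ∈ s ++ [y], k ≤ y + a := fun a ha => by rw [add_comm]; exact hy a ha
  have hfa : ∀ a ∈ s, (s ++ [y]).filter (fun b => k ≤ a + b) = s.filter (fun b => k ≤ a + b) ++ [y] := by
    intro a ha
    rw [List.filter_append]
    congr 1
    simp [hy a (List.mem_append_left _ ha)]
  have hfy : (s ++ [y]).filter (fun b => k ≤ y + b) = s ++ [y] := by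
    rw [List.filter_eq_self]; intro b hb; simpa using hcomm b hb
  rw [List.map_append, List.sum_append]
  simp only [List.map_cons, List.map_nil, List.sum_cons, List.sum_nil, hfy]
  rw [List.map_congr_left (fun a ha => by rw [hfa a ha]; simp :
    ∀ a ∈ s, ((((s ++ [y]).filter (fun b => k ≤ a + b)).length : Int)) = ((s.filter (fun b => k ≤ a + b)).length : Int) + 1)]
  rw [PySem.List.sum_map_add_int]
  simp [List.length_append]
  ring

lemma Tsum_singleton (k x : Int) : Tsum k [x] = if k ≤ x + x then 1 else 0 := by
  simp [Tsum, List.filter_cons]; split <;> simp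

-- grouping a sum over a list by its distinct values
lemma sum_count_ofList (ps : List Int) (g : Int → Int) :
    ((PySem.Set.ofList ps).map (fun b => (ps.count b : Int) * g b)).sum = (ps.map g).sum := by
  have hnd : (PySem.Set.ofList ps).Nodup := PySem.Set.nodup_ofList ps
  have h1 : (PySem.Set.ofList ps).toFinset = ps.toFinset := by
    ext a; simp [PySem.Set.mem_ofList]
  rw [← List.sum_toFinset _ hnd, h1, Finset.sum_list_map_count]
  simp

lemma foldl_ite_add {α : Type} (L : List α) (P : α → Prop) [DecidablePred P] (f : α → Int) (init : Int) :
    L.foldl (fun acc q => if P q then acc + f q else acc) init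
      = init + (L.map (fun q => if P q then f q else 0)).sum := by
  have h : (fun (acc : Int) q => if P q then acc + f q else acc)
      = (fun (acc : Int) q => acc + if P q then f q else 0) := by
    funext acc q; split <;> simp
  rw [h, PySem.List.foldl_add]

lemma alt_eq_Tsum (nums : List Int) (k : Int) :
    countExcellentPairs_alt nums k = Tsum k ((PySem.Set.ofList nums).map pcInt) := by
  unfold countExcellentPairs_alt
  set ps := (PySem.Set.ofList nums).map pcInt with hps
  simp only [PySem.Dict.items_counter]
  set S0 := PySem.Set.ofList ps with hS0
  set L := S0.map (fun b => (b, (ps.count b : Int))) with hL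
  have hinner : ∀ (p : Int × Int) (acc : Int),
      L.foldl (fun acc2 q => if p.1 + q.1 ≥ k then acc2 + p.2 * q.2 else acc2) acc
        = acc + (L.map (fun q => if p.1 + q.1 ≥ k then p.2 * q.2 else 0)).sum := by
    intro p acc; exact foldl_ite_add L (fun q => p.1 + q.1 ≥ k) (fun q => p.2 * q.2) acc
  rw [show (fun (acc : Int) p =>
      L.foldl (fun acc2 q => if p.1 + q.1 ≥ k then acc2 + p.2 * q.2 else acc2) acc)
      = (fun (acc : Int) p => acc + (L.map (fun q => if p.1 + q.1 ≥ k then p.2 * q.2 else 0)).sum) from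
      funext fun acc => funext fun p => hinner p acc]
  rw [PySem.List.foldl_add, zero_add]
  rw [hL, List.map_map]
  rw [show Tsum k ps = (ps.map (fun a => ((ps.filter (fun b => k ≤ a + b)).length : Int))).sum from rfl]
  rw [← sum_count_ofList ps (fun a => ((ps.filter (fun b => k ≤ a + b)).length : Int))]
  congr 1
  refine List.map_congr_left (fun b1 _ => ?_)
  simp only [Function.comp]
  rw [List.map_map]
  have hfac : (fun b2 => if b1 + b2 ≥ k then (ps.count b1 : Int) * (ps.count b2 : Int) else 0)
      = (fun b2 => (ps.count b1 : Int) * (if b1 + b2 ≥ k then (ps.count b2 : Int) else 0)) := by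
    funext b2; split <;> simp
  rw [show ((fun q : Int × Int => if b1 + q.1 ≥ k then (ps.count b1 : Int) * q.2 else 0) ∘ fun b => (b, (ps.count b : Int)))
      = (fun b2 => if b1 + b2 ≥ k then (ps.count b1 : Int) * (ps.count b2 : Int) else 0) from rfl, hfac,
      List.sum_map_mul_left]
  congr 1
  have h2 : (fun b2 => if b1 + b2 ≥ k then (ps.count b2 : Int) else 0)
      = (fun b2 => (ps.count b2 : Int) * (if k ≤ b1 + b2 then 1 else 0)) := by
    funext b2; split <;> simp_all [ge_iff_le]
  rw [h2, sum_count_ofList ps (fun b2 => if k ≤ b1 + b2 then 1 else 0)]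
  rw [show (fun b2 : Int => if k ≤ b1 + b2 then (1:Int) else 0)
      = (fun b2 : Int => if (decide (k ≤ b1 + b2) : Bool) then (1:Int) else 0) from by funext b2; simp]
  rw [PySem.List.sum_map_ite_one_zero (fun b2 => decide (k ≤ b1 + b2)) ps]
  rw [List.countP_eq_length_filter]

lemma getD_mono {t : List Int} (hs : t.Pairwise (· ≤ ·)) {i j : Nat}
    (hij : i ≤ j) (hj : j < t.length) : t.getD i 0 ≤ t.getD j 0 := by
  rw [List.getD_eq_getElem t 0 (lt_of_le_of_lt hij hj), List.getD_eq_getElem t 0 hj]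
  rcases Nat.lt_or_eq_of_le hij with h | h
  · exact List.pairwise_iff_getElem.mp hs i j _ hj h
  · simp [h]

lemma seg_mem_bounds {t : List Int} (hs : t.Pairwise (· ≤ ·)) {l r : Nat}
    (hlr : l ≤ r) (hr : r < t.length) {b : Int}
    (hb : b ∈ (t.drop l).take (r + 1 - l)) : t.getD l 0 ≤ b ∧ b ≤ t.getD r 0 := by
  obtain ⟨m, hm, rfl⟩ := List.mem_iff_getElem.mp hb
  have hm' := hm
  simp [List.length_take, List.length_drop] at hm'
  have h1 : l + m < t.length := by omega
  have he : ((t.drop l).take (r + 1 - l))[m] = t.getD (l + m) 0 := by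
    rw [List.getElem_take, List.getElem_drop, List.getD_eq_getElem t 0 h1]
  rw [he]
  exact ⟨getD_mono hs (Nat.le_add_right l m) h1, getD_mono hs (by omega) hr⟩

lemma seg_cons (t : List Int) (l r : Nat) (hlt : l < r) (hr : r < t.length) :
    (t.drop l).take (r + 1 - l) = t.getD l 0 :: (t.drop (l + 1)).take (r - l) := by
  rw [List.drop_eq_getElem_cons (by omega), show r + 1 - l = (r - l) + 1 by omega,
      List.take_succ_cons, List.getD_eq_getElem t 0 (by omega)]

lemma seg_append (t : List Int) (l r : Nat) (hlr : l ≤ r) (hr : r < t.length) :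
    (t.drop l).take (r + 1 - l) = (t.drop l).take (r - l) ++ [t.getD r 0] := by
  rw [show r + 1 - l = (r - l) + 1 by omega, List.take_add_one, List.getElem?_drop,
      show l + (r - l) = r by omega]
  simp [List.getElem?_eq_getElem hr]

lemma loopA_invariant (t : List Int) (k : Int) (hs : t.Pairwise (· ≤ ·)) :
    ∀ (d l r : Nat) (ans : Int), r - l = d → l ≤ r → r < t.length →
    (∀ i : Nat, i < l → t.getD i 0 + t.getD r 0 < k) →
    (if 2 * t.getD (loopA t k l r ans).1 0 ≥ k then (loopA t k l r ans).2 + 1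
     else (loopA t k l r ans).2) = ans + Tsum k ((t.drop l).take (r + 1 - l)) := by
  intro d
  induction d with
  | zero =>
    intro l r ans hd hlr hr _hless
    have hlr' : l = r := by omega
    subst hlr'
    rw [loopA]
    simp only [lt_irrefl, dite_false]
    rw [show l + 1 - l = 1 by omega, List.drop_eq_getElem_cons hr, List.take_succ_cons,
        List.take_zero, Tsum_singleton, ← List.getD_eq_getElem t 0 hr]
    split_ifs with h1 h2 <;> omega
  | succ d ih =>
    intro l r ans hd hlr hr hless
    have hlt : l < r := by omega
    rw [loopA]
    simp only [hlt, dite_true]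
    by_cases hc : t.getD l 0 + t.getD r 0 < k
    · rw [if_pos hc, ih (l + 1) r ans (by omega) (by omega) hr ?_]
      · congr 1
        rw [seg_cons t l r hlt hr, show r + 1 - (l + 1) = r - l by omega]
        refine (Tsum_cons_drop k _ _ ?_).symm
        intro b hb
        have hb' : b ∈ (t.drop l).take (r + 1 - l) := by
          rw [seg_cons t l r hlt hr]; exact hb
        have := (seg_mem_bounds hs (le_of_lt hlt) hr hb').2
        omega
      · intro i hi
        rcases Nat.lt_or_ge i l with h | h
        · exact hless i h
        · have : i = l := by omega
          subst this; exact hc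
    · rw [if_neg hc, ih l (r - 1) _ (by omega) (by omega) (by omega) ?_]
      · have hseg : (t.drop l).take (r + 1 - l) = (t.drop l).take (r - l) ++ [t.getD r 0] :=
          seg_append t l r hlr hr
        have hmem : ∀ a ∈ (t.drop l).take (r - l) ++ [t.getD r 0], k ≤ a + t.getD r 0 := by
          intro a ha
          rw [← hseg] at ha
          have := (seg_mem_bounds hs hlr hr ha).1
          omega
        rw [hseg, Tsum_append_take k _ _ hmem,
            show r - 1 + 1 - l = r - l by omega]
        have hlen : ((t.drop l).take (r - l)).length = r - l := by
          simp [List.length_take, List.length_drop]; omega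
        rw [hlen]
        push_cast [Nat.cast_sub hlr]
        ring
      · intro i hi
        have h1 := hless i hi
        have h2 : t.getD (r - 1) 0 ≤ t.getD r 0 := getD_mono hs (by omega) hr
        omega

-- ===== VERDICT (by name: the statement is the Claim_ definition above) =====
theorem countExcellentPairs_spec : Claim_equal_countExcellentPairs := by
  intro nums k _hdom hpre
  unfold Spec_countExcellentPairs
  simp only [countExcellentPairs]
  set S := PySem.Set.ofList nums with hS
  set ps := S.map pcInt with hps
  set t := PySem.List.sorted ps (fun x => x) false with ht
  have hSne : S ≠ [] := by
    rcases List.exists_mem_of_ne_nil nums hpre with ⟨x, hx⟩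
    exact List.ne_nil_of_mem (((PySem.Set.mem_ofList nums x).mpr hx))
  have hn : 1 ≤ S.length := List.length_pos_of_ne_nil hSne
  have htlen : t.length = S.length := by
    rw [ht, PySem.List.length_sorted, hps, List.length_map]
  have hsorted : t.Pairwise (· ≤ ·) := PySem.List.sorted_pairwise ps (fun x => x)
  have hinv := loopA_invariant t k hsorted (S.length - 1) 0 (S.length - 1) 0
    rfl (by omega) (by omega) (by intro i hi; omega)
  rw [List.drop_zero, show S.length - 1 + 1 - 0 = t.length by omega, List.take_length] at hinv
  rw [hinv, zero_add, Tsum_perm k (PySem.List.sorted_perm ps (fun x => x) false), alt_eq_Tsum]
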